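-- pv_equiv track=rewrite | github.com/pypi-data/pypi-mirror-399 | packages/theauditor/theauditor-2.0.3rc1-py3-none-any.whl/theauditor/rules/react/component_analyze.py | _extract_prop_tokens
-- ===== SOURCE A (Python) =====
-- def _extract_prop_tokens(props: str | None) -> set[str]:
--     if not props:
--         return set()
--     tokens: set[str] = set()
--     current: list[str] = []
--     for char in props:
--         if char.isalpha():
--             current.append(char.lower())
--         else:
--             if current:
--                 tokens.add("".join(current))
--                 current = []
--     if current:
--         tokens.add("".join(current))
--     return tokens
-- ===== SOURCE B (Python) =====
-- def _extract_prop_tokens(props):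
--     if not props:
--         return set()
--     tokens = set()
--     i, n = 0, len(props)
--     while i < n:
--         if props[i].isalpha():
--             j = i
--             while j < n and props[j].isalpha():
--                 j += 1
--             tokens.add(props[i:j].lower())
--             i = j
--         else:
--             i += 1
--     return tokens
-- ===== Notes on version B (the rewrite author's own statement) =====
-- stated objective: alternative
-- what changed: A accumulates characters one by one into a current-buffer that it flushes on each non-alpha boundary and again after the loop; B is a two-pointer run scanner that finds each maximal alphabetic run, slices it out and lowercases it as a whole, with no buffer and no post-loop flush.
import Mathlib
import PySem

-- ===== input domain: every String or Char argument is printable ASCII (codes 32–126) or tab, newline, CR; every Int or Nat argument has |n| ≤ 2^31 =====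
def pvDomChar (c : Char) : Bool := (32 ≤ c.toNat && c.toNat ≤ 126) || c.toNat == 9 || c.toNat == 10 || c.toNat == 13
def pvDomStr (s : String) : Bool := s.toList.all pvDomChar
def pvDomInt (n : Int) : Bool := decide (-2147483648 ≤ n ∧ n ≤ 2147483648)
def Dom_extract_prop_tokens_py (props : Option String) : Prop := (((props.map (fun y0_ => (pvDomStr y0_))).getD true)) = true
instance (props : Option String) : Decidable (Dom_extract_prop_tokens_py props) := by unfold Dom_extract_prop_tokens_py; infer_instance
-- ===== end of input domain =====

-- B replaces A's per-character buffer-and-flush accumulator with a two-pointer scan over maximal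
-- alphabetic runs, lowercasing each run as a whole (objective: alternative decomposition, same cost).

-- ===== PORT A =====
-- one step of A's 'for char in props' loop: state = (tokens, current)
def pvStepA (st : PySem.Set String × List Char) (c : Char) : PySem.Set String × List Char :=
  if PySem.Chars.isalpha c then (st.1, st.2 ++ [PySem.Chars.lowerChar c])
  else if st.2 ≠ [] then (PySem.Set.add st.1 (String.ofList st.2), [])
  else st

def extract_prop_tokens_py (props : Option String) : List String :=
  match props with
  | none => []
  | some s =>
    if s = "" then []        -- 'if not props' on a string: empty string is falsy
    else
      let st := s.toList.foldl pvStepA (PySem.Set.empty, [])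
      if st.2 ≠ [] then PySem.Set.add st.1 (String.ofList st.2) else st.1

-- ===== PORT B =====
-- outer while-loop of Source B: on an alpha char, the inner while (takeWhile/dropWhile) finds the
-- end j of the run; props[i:j].lower() is added and i jumps to j; otherwise i advances by one.
def pvScanRuns (cs : List Char) (tokens : PySem.Set String) : PySem.Set String :=
  match cs with
  | [] => tokens
  | c :: rest =>
    if PySem.Chars.isalpha c then
      pvScanRuns (rest.dropWhile PySem.Chars.isalpha)
        (PySem.Set.add tokens (PySem.Str.lower (String.ofList (cs.takeWhile PySem.Chars.isalpha))))
    else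
      pvScanRuns rest tokens
  termination_by cs.length
  decreasing_by
  · simp; exact List.length_dropWhile_le _ _
  · simp

def extract_prop_tokens_py_alt (props : Option String) : List String :=
  match props with
  | none => []
  | some s =>
    if s = "" then []
    else pvScanRuns s.toList PySem.Set.empty

-- ===== PRECONDITION & SPEC =====
def Spec_extract_prop_tokens_py (props : Option String) (out : List String) : Prop := out = extract_prop_tokens_py_alt props
instance (props : Option String) (out : List String) : Decidable (Spec_extract_prop_tokens_py props out) := by unfold Spec_extract_prop_tokens_py; infer_instance

-- ===== CLAIM (what is proved, stated in full; the proofs are below) =====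
def Claim_equal_extract_prop_tokens_py : Prop := ∀ (props : Option String), Dom_extract_prop_tokens_py props → Spec_extract_prop_tokens_py props (extract_prop_tokens_py props)

-- ===== LEMMAS AND PROOFS =====

-- A's "finish": run the rest of the loop from state (tokens, cur), then the post-loop flush
def pvFinishA (cs : List Char) (tokens : PySem.Set String) (cur : List Char) : PySem.Set String :=
  let st := cs.foldl pvStepA (tokens, cur)
  if st.2 ≠ [] then PySem.Set.add st.1 (String.ofList st.2) else st.1

-- folding A's step over an all-alpha run just appends the lowered run to the buffer
lemma foldl_stepA_run (r : List Char) (hr : ∀ c ∈ r, PySem.Chars.isalpha c = true) :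
    ∀ (rest : List Char) (tokens : PySem.Set String) (cur : List Char),
    (r ++ rest).foldl pvStepA (tokens, cur)
      = rest.foldl pvStepA (tokens, cur ++ r.map PySem.Chars.lowerChar) := by
  induction r with
  | nil => intro rest tokens cur; simp
  | cons c r ih =>
    intro rest tokens cur
    have hc : PySem.Chars.isalpha c = true := hr c (by simp)
    simp only [List.cons_append, List.foldl_cons, pvStepA, hc, if_true, List.map_cons]
    rw [ih (fun x hx => hr x (by simp [hx]))]
    simp

lemma lower_run (r : List Char) :
    PySem.Str.lower (String.ofList r) = String.ofList (r.map PySem.Chars.lowerChar) := by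
  apply String.toList_injective
  simp [PySem.Str.toList_lower, PySem.Chars.lower]

lemma finishA_eq_scan_fuel : ∀ (n : Nat) (cs : List Char), cs.length ≤ n →
    ∀ tokens, pvFinishA cs tokens [] = pvScanRuns cs tokens := by
  intro n
  induction n with
  | zero =>
    intro cs hcs tokens
    have : cs = [] := List.eq_nil_of_length_eq_zero (Nat.le_zero.mp hcs)
    subst this; simp [pvFinishA, pvScanRuns]
  | succ n ih =>
    intro cs hcs tokens
    match cs with
    | [] => simp [pvFinishA, pvScanRuns]
    | c :: rest =>
      by_cases hc : PySem.Chars.isalpha c = true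
      · -- head of an alphabetic run: A buffers the whole run, B slices it
        have hsplit : c :: rest
            = (c :: rest).takeWhile PySem.Chars.isalpha ++ (c :: rest).dropWhile PySem.Chars.isalpha :=
          (List.takeWhile_append_dropWhile).symm
        have hralpha : ∀ x ∈ (c :: rest).takeWhile PySem.Chars.isalpha,
            PySem.Chars.isalpha x = true := fun x hx => List.mem_takeWhile_imp hx
        have hrne : (c :: rest).takeWhile PySem.Chars.isalpha ≠ [] := by
          simp [hc]
        have hmapne : ((c :: rest).takeWhile PySem.Chars.isalpha).map PySem.Chars.lowerChar ≠ [] := by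
          simpa using hrne
        have hfold : pvFinishA (c :: rest) tokens []
            = pvFinishA ((c :: rest).dropWhile PySem.Chars.isalpha) tokens
                (((c :: rest).takeWhile PySem.Chars.isalpha).map PySem.Chars.lowerChar) := by
          unfold pvFinishA
          conv_lhs => rw [hsplit]
          rw [foldl_stepA_run _ hralpha]
          simp
        have hscan : pvScanRuns (c :: rest) tokens
            = pvScanRuns ((c :: rest).dropWhile PySem.Chars.isalpha)
                (PySem.Set.add tokens
                  (String.ofList (((c :: rest).takeWhile PySem.Chars.isalpha).map PySem.Chars.lowerChar))) := by
          rw [pvScanRuns, lower_run]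
          simp [hc]
        have hdlen : ((c :: rest).dropWhile PySem.Chars.isalpha).length ≤ rest.length := by
          simp [hc]
          exact List.length_dropWhile_le _ _
        rw [hfold, hscan]
        cases hd : (c :: rest).dropWhile PySem.Chars.isalpha with
        | nil => simp [pvFinishA, pvScanRuns, hmapne]
        | cons e t =>
          have he : PySem.Chars.isalpha e = false := by
            have hne : (c :: rest).dropWhile PySem.Chars.isalpha ≠ [] := by simp [hd]
            have := List.head_dropWhile_not PySem.Chars.isalpha hne
            rwa [show ((c :: rest).dropWhile PySem.Chars.isalpha).head hne = e by simp [hd]] at this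
          have hstep : pvStepA (tokens, ((c :: rest).takeWhile PySem.Chars.isalpha).map PySem.Chars.lowerChar) e
              = (PySem.Set.add tokens
                  (String.ofList (((c :: rest).takeWhile PySem.Chars.isalpha).map PySem.Chars.lowerChar)), []) := by
            simp [pvStepA, he, hmapne]
          have h1 : pvFinishA (e :: t) tokens
                (((c :: rest).takeWhile PySem.Chars.isalpha).map PySem.Chars.lowerChar)
              = pvFinishA t (PySem.Set.add tokens
                  (String.ofList (((c :: rest).takeWhile PySem.Chars.isalpha).map PySem.Chars.lowerChar))) [] := by
            unfold pvFinishA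
            simp only [List.foldl_cons, hstep]
          have htlen : t.length ≤ n := by
            have : (e :: t).length ≤ rest.length := hd ▸ hdlen
            simp at this hcs; omega
          rw [h1, ih t htlen, pvScanRuns]
          simp [he]
      · -- non-alpha head: A's step is a no-op on the empty buffer, B skips the char
        have hstep : pvStepA (tokens, ([] : List Char)) c = (tokens, []) := by
          simp [pvStepA, hc]
        have h1 : pvFinishA (c :: rest) tokens [] = pvFinishA rest tokens [] := by
          unfold pvFinishA; simp only [List.foldl_cons, hstep]
        have hlen : rest.length ≤ n := by simp at hcs; omega
        rw [h1, ih rest hlen, pvScanRuns]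
        simp [hc]

-- ===== VERDICT (by name: the statement is the Claim_ definition above) =====
theorem extract_prop_tokens_py_spec : Claim_equal_extract_prop_tokens_py := by
  intro props _
  unfold Spec_extract_prop_tokens_py extract_prop_tokens_py extract_prop_tokens_py_alt
  match props with
  | none => rfl
  | some s =>
    by_cases hs : s = ""
    · simp [hs]
    · simp only [hs, if_false]
      exact finishA_eq_scan_fuel s.toList.length s.toList le_rfl PySem.Set.empty
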